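-- pv_equiv track=rewrite | github.com/manuel-j-glynias/nova | report.py | compress_by_therapy
-- ===== SOURCE A (Python) =====
-- def compress_by_therapy(therapies):
--     compressed = []
--     last_t = None
--     last_cap = None
--     for t in therapies:
--         if last_t is None:
--             last_t = t
--             last_cap = t['cap']
--         else:
--             if t['cap'] == last_cap:
--                 last_t['therapy'] += ', ' + t['therapy']
--                 if 'Trial' in t['setting']:
--                     last_t['setting'] += ', ' + t['setting'][20:]
--                     if t['evidence'] is not '-':
--                         if last_t['evidence'] is '-':
--                             last_t['evidence'] = t['evidence']
--                         else:
--                             last_t['evidence'] += ', ' + t['evidence']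
--             else:
--                 compressed.append(last_t)
--                 last_t = t
--                 last_cap = t['cap']
--     if last_t != None:
--         compressed.append(last_t)
--     return compressed
-- ===== SOURCE B (Python) =====
-- # Staged-passes re-implementation: (1) compute the run-boundary indices, (2) cut the
-- # list into slices at those boundaries, (3) fold each slice into its first dict
-- # (mutated in place, like the original; returned dicts are the same objects).
-- def _merge(acc, t):
--     acc['therapy'] += ', ' + t['therapy']
--     if 'Trial' in t['setting']:
--         acc['setting'] += ', ' + t['setting'][20:]
--         if t['evidence'] is not '-':
--             if acc['evidence'] is '-':
--                 acc['evidence'] = t['evidence']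
--             else:
--                 acc['evidence'] += ', ' + t['evidence']
--     return acc
--
-- def compress_by_therapy(therapies):
--     n = len(therapies)
--     starts = [i for i in range(n)
--               if i == 0 or therapies[i]['cap'] != therapies[i - 1]['cap']]
--     groups = [therapies[s:e] for s, e in zip(starts, starts[1:] + [n])]
--     out = []
--     for g in groups:
--         acc = g[0]
--         for t in g[1:]:
--             acc = _merge(acc, t)
--         out.append(acc)
--     return out
-- ===== Notes on version B (the rewrite author's own statement) =====
-- stated objective: alternative
-- what changed: Replaced A's single-pass state machine carrying last_t/last_cap with three staged passes: first compute all run-boundary indices, then slice the input into groups at those boundaries, then fold each group into its first dict.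
import Mathlib
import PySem

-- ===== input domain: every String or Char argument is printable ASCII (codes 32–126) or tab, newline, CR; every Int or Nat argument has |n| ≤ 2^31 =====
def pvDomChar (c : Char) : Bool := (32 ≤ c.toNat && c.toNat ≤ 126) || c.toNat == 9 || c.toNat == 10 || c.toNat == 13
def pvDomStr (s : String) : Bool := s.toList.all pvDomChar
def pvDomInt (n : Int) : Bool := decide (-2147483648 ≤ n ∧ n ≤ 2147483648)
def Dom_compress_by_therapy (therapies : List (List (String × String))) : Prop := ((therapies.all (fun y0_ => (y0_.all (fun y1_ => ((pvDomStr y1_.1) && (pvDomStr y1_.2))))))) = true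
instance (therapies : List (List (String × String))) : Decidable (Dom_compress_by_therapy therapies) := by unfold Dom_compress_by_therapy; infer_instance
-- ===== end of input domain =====

-- B replaces A's one-pass last_t/last_cap state machine by three staged passes:
-- compute the run-boundary indices, cut the list into groups at those boundaries,
-- fold each group into its first dict (same in-place mutation of the input dicts as
-- A; the equivalence proved here is about the return value).
-- Python's `is '-'` / `is not '-'` are ported as (in)equality: CPython caches
-- one-character strings, so identity and equality coincide for '-'.

-- shared dict-lookup/assignment helpers on the assoc-list encoding of a Python dict
def pvGet (d : List (String × String)) (k : String) : String := (PySem.Dict.mk d).getD k ""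
def pvSet (d : List (String × String)) (k v : String) : List (String × String) := ((PySem.Dict.mk d).insert k v).items

-- ===== PORT A =====
def pvStepA (s : List (List (String × String)) × Option (List (String × String) × String))
    (t : List (String × String)) :
    List (List (String × String)) × Option (List (String × String) × String) :=
  match s.2 with
  | none => (s.1, some (t, pvGet t "cap"))
  | some (lastT, lastCap) =>
    if pvGet t "cap" == lastCap then
      let lastT := pvSet lastT "therapy" (pvGet lastT "therapy" ++ ", " ++ pvGet t "therapy")
      let lastT :=
        if PySem.Str.isIn "Trial" (pvGet t "setting") then
          let lastT := pvSet lastT "setting"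
            (pvGet lastT "setting" ++ ", " ++ PySem.Str.slice (pvGet t "setting") (some 20) none)
          if pvGet t "evidence" ≠ "-" then
            if pvGet lastT "evidence" == "-" then pvSet lastT "evidence" (pvGet t "evidence")
            else pvSet lastT "evidence" (pvGet lastT "evidence" ++ ", " ++ pvGet t "evidence")
          else lastT
        else lastT
      (s.1, some (lastT, lastCap))
    else (s.1 ++ [lastT], some (t, pvGet t "cap"))

def pvFinishA (s : List (List (String × String)) × Option (List (String × String) × String)) :
    List (List (String × String)) :=
  match s with
  | (compressed, some (lastT, _)) => compressed ++ [lastT]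
  | (compressed, none) => compressed

def compress_by_therapy (therapies : List (List (String × String))) : List (List (String × String)) :=
  pvFinishA (therapies.foldl pvStepA ([], none))

-- ===== PORT B =====
-- _merge(acc, t) of Source B
def pvMergeB (acc t : List (String × String)) : List (String × String) :=
  let acc := pvSet acc "therapy" (pvGet acc "therapy" ++ ", " ++ pvGet t "therapy")
  if PySem.Str.isIn "Trial" (pvGet t "setting") then
    let acc := pvSet acc "setting"
      (pvGet acc "setting" ++ ", " ++ PySem.Str.slice (pvGet t "setting") (some 20) none)
    if pvGet t "evidence" ≠ "-" then
      if pvGet acc "evidence" == "-" then pvSet acc "evidence" (pvGet t "evidence")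
      else pvSet acc "evidence" (pvGet acc "evidence" ++ ", " ++ pvGet t "evidence")
    else acc
  else acc

-- therapies[i]['cap'] (index always in range where used; default [] is never hit)
def pvCapB (ts : List (List (String × String))) (i : Nat) : String := pvGet (ts.getD i []) "cap"

-- the comprehension condition `i == 0 or therapies[i]['cap'] != therapies[i-1]['cap']`
def pvIsStart (ts : List (List (String × String))) (i : Nat) : Bool :=
  i == 0 || !(pvCapB ts i == pvCapB ts (i - 1))

-- `acc = g[0]; for t in g[1:]: acc = _merge(acc, t)` (groups are never empty, so
-- Python's g[0] never raises; the [] case is unreachable)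
def pvFoldGroup (g : List (List (String × String))) : List (String × String) :=
  match g with
  | [] => []
  | a :: r => r.foldl pvMergeB a

def compress_by_therapy_alt (therapies : List (List (String × String))) : List (List (String × String)) :=
  let n := therapies.length
  let starts := (List.range n).filter (pvIsStart therapies)
  let groups := (starts.zip (starts.drop 1 ++ [n])).map
    (fun p => PySem.List.slice therapies (some (p.1 : Int)) (some (p.2 : Int)))
  groups.map pvFoldGroup

-- ===== PRECONDITION & SPEC =====
-- Pre_ = exactly the inputs on which Python A returns (no KeyError): every dict has
-- 'cap', and wherever adjacent caps are equal (A merges there) the element carries the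
-- keys the merge reads, and the run's first element carries the keys the merge reads
-- from the accumulator ('setting'/'evidence' only when a Trial member makes A read them).
def pvHasKey (d : List (String × String)) (k : String) : Bool := (PySem.Dict.mk d).contains k
def pvCapAt (ts : List (List (String × String))) (i : Nat) : String :=
  (PySem.Dict.mk (ts.getD i [])).getD "cap" ""
def pvTrialAt (ts : List (List (String × String))) (i : Nat) : Bool :=
  PySem.Str.isIn "Trial" ((PySem.Dict.mk (ts.getD i [])).getD "setting" "")
def pvEvAt (ts : List (List (String × String))) (i : Nat) : String :=
  (PySem.Dict.mk (ts.getD i [])).getD "evidence" ""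
-- pvRunHead ts i j: i is the first index of the maximal equal-'cap' run containing j
def pvRunHead (ts : List (List (String × String))) (i j : Nat) : Bool :=
  ((List.range j).all fun k => !(decide (i ≤ k)) || (pvCapAt ts k == pvCapAt ts (k + 1)))
    && (decide (i = 0) || !(pvCapAt ts (i - 1) == pvCapAt ts i))

def Pre_compress_by_therapy (therapies : List (List (String × String))) : Prop :=
  ((therapies.all fun d => pvHasKey d "cap")
    && (List.range therapies.length).all fun j =>
      !(decide (1 ≤ j)) || !(pvCapAt therapies (j - 1) == pvCapAt therapies j)
      || (pvHasKey (therapies.getD j []) "therapy"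
          && pvHasKey (therapies.getD j []) "setting"
          && (!(pvTrialAt therapies j) || pvHasKey (therapies.getD j []) "evidence")
          && (List.range j).all fun i =>
            !(pvRunHead therapies i j)
            || (pvHasKey (therapies.getD i []) "therapy"
                && (!(pvTrialAt therapies j)
                    || (pvHasKey (therapies.getD i []) "setting"
                        && (pvEvAt therapies j == "-"
                            || pvHasKey (therapies.getD i []) "evidence")))))) = true
instance (therapies : List (List (String × String))) : Decidable (Pre_compress_by_therapy therapies) := by
  unfold Pre_compress_by_therapy; infer_instance

def pvWitness_compress_by_therapy : (List (List (String × String))) :=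
  [[("cap", "1"), ("therapy", "a"), ("setting", "Adjuvant"), ("evidence", "-")],
   [("cap", "1"), ("therapy", "b"), ("setting", "Clinical Trial setting X"), ("evidence", "e")]]

def Spec_compress_by_therapy (therapies : List (List (String × String))) (out : List (List (String × String))) : Prop := out = compress_by_therapy_alt therapies
instance (therapies : List (List (String × String))) (out : List (List (String × String))) : Decidable (Spec_compress_by_therapy therapies out) := by unfold Spec_compress_by_therapy; infer_instance

-- ===== CLAIM (what is proved, stated in full; the proofs are below) =====
def Claim_equal_compress_by_therapy : Prop := ∀ (therapies : List (List (String × String))), Dom_compress_by_therapy therapies → Pre_compress_by_therapy therapies → Spec_compress_by_therapy therapies (compress_by_therapy therapies)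

-- ===== LEMMAS AND PROOFS =====
-- proof-side intermediate: the run recursion both ports compute
def pvRec : List (List (String × String)) → List (List (String × String))
  | [] => []
  | t :: rest =>
    ((rest.takeWhile (fun u => pvGet u "cap" == pvGet t "cap")).foldl pvMergeB t)
      :: pvRec (rest.dropWhile (fun u => pvGet u "cap" == pvGet t "cap"))
termination_by ts => ts.length
decreasing_by exact Nat.lt_succ_of_le (List.length_dropWhile_le _ _)

lemma pv_foldA_run (ts : List (List (String × String)))
    (compressed : List (List (String × String))) (lt : List (String × String)) (cap : String) :
    pvFinishA (ts.foldl pvStepA (compressed, some (lt, cap))) =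
      compressed ++ ((ts.takeWhile (fun u => pvGet u "cap" == cap)).foldl pvMergeB lt)
        :: pvRec (ts.dropWhile (fun u => pvGet u "cap" == cap)) := by
  induction ts generalizing compressed lt cap with
  | nil => simp [pvFinishA, pvRec]
  | cons u rest ih =>
    rw [List.foldl_cons]
    by_cases h : pvGet u "cap" == cap
    · have hstep : pvStepA (compressed, some (lt, cap)) u = (compressed, some (pvMergeB lt u, cap)) := by
        simp [pvStepA, pvMergeB, h]
      rw [hstep, ih]
      simp [h]
    · have hstep : pvStepA (compressed, some (lt, cap)) u
          = (compressed ++ [lt], some (u, pvGet u "cap")) := by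
        simp [pvStepA, h]
      rw [hstep, ih]
      conv_rhs => rw [pvRec.eq_def]
      simp [h]

lemma pv_A_eq_rec (ts : List (List (String × String))) : compress_by_therapy ts = pvRec ts := by
  cases ts with
  | nil => simp [compress_by_therapy, pvFinishA, pvRec]
  | cons t rest =>
    show pvFinishA (List.foldl pvStepA (pvStepA ([], none) t) rest) = _
    have h0 : pvStepA ([], none) t = ([], some (t, pvGet t "cap")) := rfl
    rw [h0, pv_foldA_run]
    conv_rhs => rw [pvRec.eq_def]
    simp

lemma pv_capB_drop (ts : List (List (String × String))) (r i : Nat) :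
    pvCapB (ts.drop r) i = pvCapB ts (r + i) := by
  simp [pvCapB, List.getD, List.getElem?_drop]

lemma pv_capB_run (t : List (String × String)) (rest : List (List (String × String))) (j : Nat)
    (hj : j < (rest.takeWhile (fun u => pvGet u "cap" == pvGet t "cap")).length + 1) :
    pvCapB (t :: rest) j = pvGet t "cap" := by
  cases j with
  | zero => simp [pvCapB, List.getD]
  | succ i =>
    have hi : i < (rest.takeWhile (fun u => pvGet u "cap" == pvGet t "cap")).length := by omega
    have hrest : rest[i]? = (rest.takeWhile (fun u => pvGet u "cap" == pvGet t "cap"))[i]? := by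
      conv_lhs => rw [← List.takeWhile_append_dropWhile
        (p := fun u => pvGet u "cap" == pvGet t "cap") (l := rest)]
      exact List.getElem?_append_left hi
    have hmem : (fun u => pvGet u "cap" == pvGet t "cap")
        ((rest.takeWhile (fun u => pvGet u "cap" == pvGet t "cap"))[i]'hi) = true :=
      List.mem_takeWhile_imp (p := fun u => pvGet u "cap" == pvGet t "cap") (l := rest)
        (List.getElem_mem hi)
    have : pvCapB (t :: rest) (i + 1)
        = pvGet ((rest.takeWhile (fun u => pvGet u "cap" == pvGet t "cap"))[i]'hi) "cap" := by
      simp [pvCapB, List.getD, hrest, List.getElem?_eq_getElem hi]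
    rw [this]
    exact eq_of_beq hmem

lemma pv_dropWhile_head_false {α : Type} (p : α → Bool) (l : List α) (x : α) (xs : List α)
    (h : l.dropWhile p = x :: xs) : p x = false := by
  induction l with
  | nil => simp [List.dropWhile] at h
  | cons a as ih =>
    rw [List.dropWhile_cons] at h
    by_cases hp : p a
    · simp [hp] at h; exact ih h
    · simp [hp] at h; rw [← h.1]; simpa using hp

-- starts of t::rest = 0 :: starts of (dropWhile run) shifted by the run length
lemma pv_starts_cons (t : List (String × String)) (rest : List (List (String × String))) :
    (List.range (t :: rest).length).filter (pvIsStart (t :: rest)) =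
      0 :: ((List.range ((rest.dropWhile (fun u => pvGet u "cap" == pvGet t "cap")).length)).filter
              (pvIsStart (rest.dropWhile (fun u => pvGet u "cap" == pvGet t "cap")))).map
            (fun i => ((rest.takeWhile (fun u => pvGet u "cap" == pvGet t "cap")).length + 1) + i) := by
  set w := rest.takeWhile (fun u => pvGet u "cap" == pvGet t "cap") with hw
  set d := rest.dropWhile (fun u => pvGet u "cap" == pvGet t "cap") with hd
  have hwd : w ++ d = rest := List.takeWhile_append_dropWhile
  have hlen : (t :: rest).length = (w.length + 1) + d.length := by
    have := congrArg List.length hwd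
    simp at this
    simp [List.length_cons]
    omega
  have hdrop : (t :: rest).drop (w.length + 1) = d := by
    show rest.drop w.length = d
    rw [← hwd, List.drop_left]
  rw [hlen, List.range_add, List.filter_append]
  have h1 : (List.range (w.length + 1)).filter (pvIsStart (t :: rest)) = [0] := by
    have hsplit : w.length + 1 = 1 + w.length := by omega
    rw [hsplit, List.range_add, List.filter_append]
    have ha : (List.range 1).filter (pvIsStart (t :: rest)) = [0] := by
      simp [List.range_one, List.filter, pvIsStart]
    have hb : ((List.range w.length).map (fun x => 1 + x)).filter (pvIsStart (t :: rest)) = [] := by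
      rw [List.filter_eq_nil_iff]
      intro a ha'
      simp only [List.mem_map, List.mem_range] at ha'
      obtain ⟨i, hi, rfl⟩ := ha'
      have e1 : pvCapB (t :: rest) (1 + i) = pvGet t "cap" := pv_capB_run t rest _ (by rw [← hw]; omega)
      have e2 : pvCapB (t :: rest) i = pvGet t "cap" := pv_capB_run t rest _ (by rw [← hw]; omega)
      simp [pvIsStart, e1, e2]
    rw [ha, hb]
    rfl
  rw [h1, List.filter_map]
  have h2 : (List.range d.length).filter
        ((pvIsStart (t :: rest)) ∘ (fun x => (w.length + 1) + x))
      = (List.range d.length).filter (pvIsStart d) := by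
    apply List.filter_congr
    intro i hi
    simp only [List.mem_range] at hi
    simp only [Function.comp]
    cases i with
    | zero =>
      obtain ⟨d0, d', hdd⟩ : ∃ d0 d', d = d0 :: d' := by
        cases hc : d with
        | nil => rw [hc] at hi; simp at hi
        | cons x xs => exact ⟨x, xs, rfl⟩
      have hp0 : (pvGet d0 "cap" == pvGet t "cap") = false :=
        pv_dropWhile_head_false _ rest d0 d' (by rw [← hd, hdd])
      have e1 : pvCapB (t :: rest) (w.length + 1) = pvGet d0 "cap" := by
        have h := pv_capB_drop (t :: rest) (w.length + 1) 0
        rw [hdrop, hdd] at h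
        rw [Nat.add_zero] at h
        rw [← h]
        simp [pvCapB, List.getD]
      have e2 : pvCapB (t :: rest) (w.length + 1 - 1) = pvGet t "cap" :=
        pv_capB_run t rest _ (by rw [← hw]; omega)
      have hL : pvIsStart (t :: rest) (w.length + 1) = true := by
        unfold pvIsStart
        rw [e1, e2, hp0]
        simp
      have hR : pvIsStart d 0 = true := by simp [pvIsStart]
      rw [Nat.add_zero, hL, hR]
    | succ j =>
      have e1 : pvCapB (t :: rest) (w.length + 1 + (j + 1)) = pvCapB d (j + 1) := by
        have := pv_capB_drop (t :: rest) (w.length + 1) (j + 1)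
        rw [hdrop] at this
        exact this.symm
      have e2 : pvCapB (t :: rest) (w.length + 1 + (j + 1) - 1) = pvCapB d j := by
        have harith : w.length + 1 + (j + 1) - 1 = w.length + 1 + j := by omega
        rw [harith]
        have h := pv_capB_drop (t :: rest) (w.length + 1) j
        rw [hdrop] at h
        exact h.symm
      unfold pvIsStart
      rw [e1, e2]
      simp
  rw [h2]
  rfl

lemma pv_alt_pipeline (u : List (List (String × String))) :
    compress_by_therapy_alt u =
      ((((List.range u.length).filter (pvIsStart u)).zip
          ((((List.range u.length).filter (pvIsStart u)).drop 1) ++ [u.length])).map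
        (fun q => pvFoldGroup (PySem.List.slice u (some (q.1 : Int)) (some (q.2 : Int))))) := by
  simp [compress_by_therapy_alt, List.map_map, Function.comp]

lemma pv_B_eq_rec (ts : List (List (String × String))) : compress_by_therapy_alt ts = pvRec ts := by
  induction ts using pvRec.induct with
  | case1 => simp [compress_by_therapy_alt, pvRec]
  | case2 t rest ih =>
    set w := rest.takeWhile (fun u => pvGet u "cap" == pvGet t "cap") with hw
    set d := rest.dropWhile (fun u => pvGet u "cap" == pvGet t "cap") with hd
    have hwd : w ++ d = rest := List.takeWhile_append_dropWhile
    have hlen : (t :: rest).length = (w.length + 1) + d.length := by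
      have := congrArg List.length hwd
      simp at this
      simp [List.length_cons]
      omega
    have hdrop : (t :: rest).drop (w.length + 1) = d := by
      show rest.drop w.length = d
      rw [← hwd, List.drop_left]
    have htake : (t :: rest).take (w.length + 1) = t :: w := by
      rw [List.take_cons (by omega)]
      simp [← hwd]
    have hrec : pvRec (t :: rest) = (w.foldl pvMergeB t) :: pvRec d := by
      conv_lhs => rw [pvRec.eq_def]
    rw [pv_alt_pipeline, pv_starts_cons, ← hw, ← hd, hrec, ← ih, pv_alt_pipeline]
    cases hdd : d with
    | nil =>
      have hwrest : w = rest := by rw [← hwd, hdd, List.append_nil]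
      simp [PySem.List.slice_natCast, pvFoldGroup, hwrest]
    | cons d0 d' =>
      have hs' : (List.range (d0 :: d').length).filter (pvIsStart (d0 :: d'))
          = 0 :: ((List.range d'.length).map Nat.succ).filter (pvIsStart (d0 :: d')) := by
        rw [show (d0 :: d').length = d'.length + 1 from rfl, List.range_succ_eq_map,
          List.filter_cons_of_pos (by simp [pvIsStart])]
      rw [hs']
      have hn2 : (t :: rest).length = (w.length + 1) + (d0 :: d').length := by
        rw [hlen, hdd]
      rw [hn2]
      simp only [List.map_cons, List.drop_succ_cons, List.drop_zero, List.cons_append,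
        List.zip_cons_cons, List.map_cons]
      congr 1
      · show pvFoldGroup (PySem.List.slice (t :: rest)
            (some ((0 : Nat) : Int)) (some ((w.length + 1 + 0 : Nat) : Int))) = _
        rw [PySem.List.slice_natCast]
        rw [show w.length + 1 + 0 - 0 = w.length + 1 from rfl, List.drop_zero, htake]
        rfl
      · have hzip : ∀ (S : List Nat),
            (((w.length + 1 + 0) :: S.map (fun i => w.length + 1 + i)).zip
                (S.map (fun i => w.length + 1 + i) ++ [w.length + 1 + (d0 :: d').length]))
              = ((0 :: S).zip (S ++ [(d0 :: d').length])).map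
                  (Prod.map (fun i => w.length + 1 + i) (fun i => w.length + 1 + i)) := by
          intro S
          rw [← List.zip_map, List.map_cons, List.map_append]
          rfl
        rw [hzip, List.map_map]
        apply List.map_congr_left
        intro q _
        show pvFoldGroup (PySem.List.slice (t :: rest)
              (some ((w.length + 1 + q.1 : Nat) : Int)) (some ((w.length + 1 + q.2 : Nat) : Int)))
            = pvFoldGroup (PySem.List.slice (d0 :: d') (some (q.1 : Int)) (some (q.2 : Int)))
        rw [PySem.List.slice_natCast, PySem.List.slice_natCast]
        have h2 : w.length + 1 + q.2 - (w.length + 1 + q.1) = q.2 - q.1 := by omega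
        have h1 : (t :: rest).drop (w.length + 1 + q.1) = (d0 :: d').drop q.1 := by
          rw [← List.drop_drop, hdrop, hdd]
        rw [h1, h2]

-- ===== VERDICT (by name: the statement is the Claim_ definition above) =====
theorem compress_by_therapy_spec : Claim_equal_compress_by_therapy := by
  intro ts _ _
  unfold Spec_compress_by_therapy
  rw [pv_A_eq_rec, pv_B_eq_rec]
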